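-- pv_equiv track=rewrite | github.com/dhruvildarji/chess_bot | scripts/create_test_train.py | format_in_other_way
-- ===== SOURCE A (Python) =====
-- def format_in_other_way(formatted_data_):
--     """Formats chess game data into a specific Input/Output format for ML model training."""
--     formatted_data = []
--     c = 0
--     for game_data in formatted_data_[5:]:
--         parts = game_data.split("###")
--         moves_part = parts[1].strip() if len(parts) > 1 else ""
--         moves = moves_part.split(" ")  # Skip the game metadata, start with actual moves
--
--         for i in range(len(moves)):
--             if "B" in moves[i].split(".")[0]:
--                 input_sequence = " - ".join(moves[:i])
--                 output_move = moves[i][1:] if i < len(moves) else ""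
--                 formatted_data.append((input_sequence, output_move))
--         formatted_data.append(("new_game","new_game"))
--     return formatted_data
-- ===== SOURCE B (Python) =====
-- def _pairs(moves):
--     """One pass: maintain the running ' - '-joined prefix instead of re-joining moves[:i] at each hit."""
--     out = []
--     prefix = ""
--     first = True
--     for mv in moves:
--         if "B" in mv.split(".")[0]:
--             out.append((prefix, mv[1:]))
--         prefix = mv if first else prefix + " - " + mv
--         first = False
--     return out
--
--
-- def format_in_other_way(formatted_data_):
--     result = []
--     for game_data in formatted_data_[5:]:
--         parts = game_data.split("###")
--         moves_part = parts[1].strip() if len(parts) > 1 else ""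
--         result.extend(_pairs(moves_part.split(" ")))
--         result.append(("new_game", "new_game"))
--     return result
-- ===== Notes on version B (the rewrite author's own statement) =====
-- stated objective: alternative
-- what changed: Per game, the re-computation of ' - '.join(moves[:i]) at every qualifying index is replaced by a single pass over the moves that carries the running joined prefix (updated once per move), emitted via a per-game helper; it trades repeated joins of a slice for one maintained accumulator string.
import Mathlib
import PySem

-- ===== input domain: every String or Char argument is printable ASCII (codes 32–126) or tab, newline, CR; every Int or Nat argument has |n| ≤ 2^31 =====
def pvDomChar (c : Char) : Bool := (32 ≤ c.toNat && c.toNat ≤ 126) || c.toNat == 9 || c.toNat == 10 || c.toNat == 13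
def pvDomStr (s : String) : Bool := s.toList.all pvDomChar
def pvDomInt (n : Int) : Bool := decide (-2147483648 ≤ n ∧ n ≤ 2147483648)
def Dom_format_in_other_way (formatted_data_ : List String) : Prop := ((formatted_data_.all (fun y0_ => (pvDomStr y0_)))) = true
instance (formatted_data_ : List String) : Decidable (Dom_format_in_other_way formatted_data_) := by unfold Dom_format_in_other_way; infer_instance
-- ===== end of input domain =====

-- B replaces the per-hit `" - ".join(moves[:i])` recomputation by a single-pass running-prefix
-- accumulator per game (objective: alternative decomposition; same measured cost).

-- ===== PORT A =====
-- literal transliteration of A: index loop over range(len(moves)), re-joining moves[:i] at each hit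
def format_in_other_way (formatted_data_ : List String) : List (String × String) :=
  (PySem.List.slice formatted_data_ (some 5) none).foldl
    (fun formatted_data game_data =>
      let parts := (PySem.Str.split? game_data "###").getD []
      let moves_part := if parts.length > 1 then PySem.Str.strip ((PySem.List.pyGet? parts 1).getD "") else ""
      let moves := (PySem.Str.split? moves_part " ").getD []
      let formatted_data :=
        (PySem.List.pyRange 0 (moves.length : Int)).foldl
          (fun fd i =>
            if PySem.Str.isIn "B"
                ((PySem.List.pyGet? ((PySem.Str.split? ((PySem.List.pyGet? moves i).getD "") ".").getD []) 0).getD "")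
            then fd ++ [(PySem.Str.join " - " (PySem.List.slice moves none (some i)),
                         if i < (moves.length : Int)
                         then PySem.Str.slice ((PySem.List.pyGet? moves i).getD "") (some 1) none
                         else "")]
            else fd)
          formatted_data
      formatted_data ++ [("new_game", "new_game")])
    []

-- ===== PORT B =====
-- literal transliteration of Source B's `_pairs`: one pass over the moves, carrying the running prefix
def pairsB : List String → String → Bool → List (String × String)
  | [], _, _ => []
  | mv :: rest, prefix_, first =>
    (if PySem.Str.isIn "B"
        ((PySem.List.pyGet? ((PySem.Str.split? mv ".").getD []) 0).getD "")
     then [(prefix_, PySem.Str.slice mv (some 1) none)]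
     else [])
    ++ pairsB rest (if first then mv else prefix_ ++ " - " ++ mv) false

def format_in_other_way_alt (formatted_data_ : List String) : List (String × String) :=
  (PySem.List.slice formatted_data_ (some 5) none).foldl
    (fun result game_data =>
      let parts := (PySem.Str.split? game_data "###").getD []
      let moves_part := if parts.length > 1 then PySem.Str.strip ((PySem.List.pyGet? parts 1).getD "") else ""
      result ++ pairsB ((PySem.Str.split? moves_part " ").getD []) "" true ++ [("new_game", "new_game")])
    []

-- ===== PRECONDITION & SPEC =====
def Spec_format_in_other_way (formatted_data_ : List String) (out : List (String × String)) : Prop := out = format_in_other_way_alt formatted_data_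
instance (formatted_data_ : List String) (out : List (String × String)) : Decidable (Spec_format_in_other_way formatted_data_ out) := by unfold Spec_format_in_other_way; infer_instance

-- ===== CLAIM (what is proved, stated in full; the proofs are below) =====
def Claim_equal_format_in_other_way : Prop := ∀ (formatted_data_ : List String), Dom_format_in_other_way formatted_data_ → Spec_format_in_other_way formatted_data_ (format_in_other_way formatted_data_)

-- ===== LEMMAS AND PROOFS =====

-- " - ".join(l ++ [p]) in terms of " - ".join(l), at the Chars level
theorem join_append_singleton (sep p : List Char) (l : List (List Char)) :
    PySem.Chars.join sep (l ++ [p]) =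
      (match l with | [] => p | _ :: _ => PySem.Chars.join sep l ++ sep ++ p) := by
  induction l with
  | nil => simp [PySem.Chars.join_singleton]
  | cons q l ih =>
    cases l with
    | nil => simp [PySem.Chars.join_cons_cons, PySem.Chars.join_singleton]
    | cons r l' =>
      simp only [List.cons_append, PySem.Chars.join_cons_cons] at ih ⊢
      rw [ih]
      simp [List.append_assoc]

-- the same at the String level, phrased as B's prefix update
theorem strJoin_append_singleton (p : String) (l : List String) :
    PySem.Str.join " - " (l ++ [p]) =
      (if l.isEmpty then p else PySem.Str.join " - " l ++ " - " ++ p) := by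
  rw [← String.toList_inj]
  cases l with
  | nil => simp [PySem.Str.toList_join, PySem.Chars.join_singleton]
  | cons q l' =>
    simp only [PySem.Str.toList_join, List.map_append, List.map_cons, List.map_nil]
    rw [join_append_singleton]
    simp [PySem.Str.toList_join]

-- key invariant: A's filtered index range over the suffix equals B's prefix-carrying pass
theorem inner_go (rest done : List String) :
    List.map
      (fun i => (PySem.Str.join " - " (PySem.List.slice (done ++ rest) none (some i)),
                 if i < (((done ++ rest).length : Nat) : Int)
                 then PySem.Str.slice ((PySem.List.pyGet? (done ++ rest) i).getD "") (some 1) none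
                 else ""))
      (List.filter
        (fun i => PySem.Str.isIn "B"
          ((PySem.List.pyGet? ((PySem.Str.split? ((PySem.List.pyGet? (done ++ rest) i).getD "") ".").getD []) 0).getD ""))
        (PySem.List.pyRange (done.length : Int) ((done.length : Int) + (rest.length : Int))))
    = pairsB rest (PySem.Str.join " - " done) done.isEmpty := by
  induction rest generalizing done with
  | nil =>
    simp [PySem.List.pyRange, pairsB]
  | cons mv rest ih =>
    have hlt : (done.length : Int) < (done.length : Int) + ((mv :: rest).length : Int) := by
      simp only [List.length_cons]; push_cast; omega
    have hget : (PySem.List.pyGet? (done ++ mv :: rest) (done.length : Int)).getD "" = mv := by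
      rw [PySem.List.pyGet?_natCast]; simp
    have hslice : PySem.List.slice (done ++ mv :: rest) none (some (done.length : Int)) = done := by
      rw [PySem.List.slice_to_natCast]; simp
    have hlen : ((done.length : Int)) < (((done ++ mv :: rest).length : Nat) : Int) := by
      simp only [List.length_append, List.length_cons]; push_cast; omega
    have h1 : (done.length : Int) + 1 = (((done ++ [mv]).length : Nat) : Int) := by
      simp
    have h2 : (done.length : Int) + ((mv :: rest).length : Int)
        = (((done ++ [mv]).length : Nat) : Int) + (rest.length : Int) := by
      simp only [List.length_append, List.length_cons, List.length_nil]; push_cast; omega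
    have hre : done ++ mv :: rest = (done ++ [mv]) ++ rest := by simp
    have hpre : PySem.Str.join " - " (done ++ [mv])
        = (if done.isEmpty then mv else PySem.Str.join " - " done ++ " - " ++ mv) :=
      strJoin_append_singleton mv done
    have hih := ih (done ++ [mv])
    rw [hpre] at hih
    rw [PySem.List.pyRange_one_cons hlt, List.filter_cons, hget]
    simp only [pairsB]
    have hemp : (done ++ [mv]).isEmpty = false := by simp
    rw [hemp] at hih
    by_cases hc : PySem.Str.isIn "B"
        ((PySem.List.pyGet? ((PySem.Str.split? mv ".").getD []) 0).getD "") = true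
    · rw [if_pos hc, if_pos hc, List.map_cons, hslice, hget, if_pos hlen]
      rw [h1, h2, hre, hih]
      simp
    · rw [if_neg hc, if_neg hc]
      rw [h1, h2, hre, hih]
      simp

theorem inner_eq (moves : List String) :
    List.map
      (fun i => (PySem.Str.join " - " (PySem.List.slice moves none (some i)),
                 if i < ((moves.length : Nat) : Int)
                 then PySem.Str.slice ((PySem.List.pyGet? moves i).getD "") (some 1) none
                 else ""))
      (List.filter
        (fun i => PySem.Str.isIn "B"
          ((PySem.List.pyGet? ((PySem.Str.split? ((PySem.List.pyGet? moves i).getD "") ".").getD []) 0).getD ""))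
        (PySem.List.pyRange 0 (moves.length : Int)))
    = pairsB moves "" true := by
  have h := inner_go moves []
  simpa using h

-- A's per-game step equals B's per-game step, fold-wise
set_option maxHeartbeats 2000000 in
theorem outer_go (gs : List String) (acc : List (String × String)) :
    gs.foldl
      (fun formatted_data game_data =>
        let parts := (PySem.Str.split? game_data "###").getD []
        let moves_part := if parts.length > 1 then PySem.Str.strip ((PySem.List.pyGet? parts 1).getD "") else ""
        let moves := (PySem.Str.split? moves_part " ").getD []
        let formatted_data :=
          (PySem.List.pyRange 0 (moves.length : Int)).foldl
            (fun fd i =>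
              if PySem.Str.isIn "B"
                  ((PySem.List.pyGet? ((PySem.Str.split? ((PySem.List.pyGet? moves i).getD "") ".").getD []) 0).getD "")
              then fd ++ [(PySem.Str.join " - " (PySem.List.slice moves none (some i)),
                           if i < (moves.length : Int)
                           then PySem.Str.slice ((PySem.List.pyGet? moves i).getD "") (some 1) none
                           else "")]
              else fd)
            formatted_data
        formatted_data ++ [("new_game", "new_game")]) acc
    = gs.foldl
      (fun result game_data =>
        let parts := (PySem.Str.split? game_data "###").getD []
        let moves_part := if parts.length > 1 then PySem.Str.strip ((PySem.List.pyGet? parts 1).getD "") else ""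
        result ++ pairsB ((PySem.Str.split? moves_part " ").getD []) "" true ++ [("new_game", "new_game")]) acc := by
  induction gs generalizing acc with
  | nil => simp only [List.foldl_nil]
  | cons g gs ih =>
    simp only [List.foldl_cons]
    rw [ih, PySem.List.foldl_append_if, inner_eq]

-- ===== VERDICT (by name: the statement is the Claim_ definition above) =====
theorem format_in_other_way_spec : Claim_equal_format_in_other_way := by
  intro fd _
  unfold Spec_format_in_other_way format_in_other_way format_in_other_way_alt
  exact outer_go _ []
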